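-- pv_equiv track=rewrite | github.com/data-jeong/lecture | python3_tutorial/06_web_scraping/news_crawler/analyzers/keyword.py | find_related_keywords
-- ===== SOURCE A (Python) =====
-- from typing import List, Dict, Tuple, Set
-- from collections import Counter
--
-- def find_related_keywords(target_keyword: str, text: str, window_size: int = 5) -> List[str]:
--     """특정 키워드와 관련된 키워드 찾기"""
--     words = text.split()
--     related = []
--
--     for i, word in enumerate(words):
--         if target_keyword.lower() in word.lower():
--             # 윈도우 범위 내 단어들 수집
--             start = max(0, i - window_size)
--             end = min(len(words), i + window_size + 1)
--
--             context_words = words[start:end]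
--             related.extend([w for w in context_words if w.lower() != target_keyword.lower()])
--
--     # 빈도 기준 정렬
--     related_counts = Counter(related)
--     return [word for word, count in related_counts.most_common(10)]
-- ===== SOURCE B (Python) =====
-- def find_related_keywords(target_keyword: str, text: str, window_size: int = 5):
--     """Prefix-sum re-implementation: one pass per position instead of a slice per match."""
--     words = text.split()
--     t = target_keyword.lower()
--     n = len(words)
--     lows = [w.lower() for w in words]
--     # prefix sums of the match indicator: P[k] = number of matches among the first k words
--     P = [0]
--     acc = 0
--     for lw in lows:
--         if t in lw:
--             acc += 1
--         P.append(acc)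
--     counts = {}
--     for j in range(n):
--         if lows[j] == t:
--             continue
--         lo = max(0, j - window_size)
--         hi = min(n, j + window_size + 1)
--         cnt = P[hi] - P[lo] if lo < hi else 0
--         if cnt:
--             counts[words[j]] = counts.get(words[j], 0) + cnt
--     ranked = sorted(counts.items(), key=lambda kv: kv[1], reverse=True)
--     return [w for w, _ in ranked[:10]]
-- ===== Notes on version B (the rewrite author's own statement) =====
-- stated objective: alternative
-- what changed: Instead of slicing a window around every match and counting the concatenated context words with Counter, B builds a prefix-sum table of the match indicator once and, in a single ascending pass over positions, adds each non-target word's O(1) window match count into an insertion-ordered dict, then ranks by count.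
-- outside the precondition, e.g. on find_related_keywords('a', 'ab x y z w', -2): A returns ['y', 'z'], B returns []
import Mathlib
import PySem

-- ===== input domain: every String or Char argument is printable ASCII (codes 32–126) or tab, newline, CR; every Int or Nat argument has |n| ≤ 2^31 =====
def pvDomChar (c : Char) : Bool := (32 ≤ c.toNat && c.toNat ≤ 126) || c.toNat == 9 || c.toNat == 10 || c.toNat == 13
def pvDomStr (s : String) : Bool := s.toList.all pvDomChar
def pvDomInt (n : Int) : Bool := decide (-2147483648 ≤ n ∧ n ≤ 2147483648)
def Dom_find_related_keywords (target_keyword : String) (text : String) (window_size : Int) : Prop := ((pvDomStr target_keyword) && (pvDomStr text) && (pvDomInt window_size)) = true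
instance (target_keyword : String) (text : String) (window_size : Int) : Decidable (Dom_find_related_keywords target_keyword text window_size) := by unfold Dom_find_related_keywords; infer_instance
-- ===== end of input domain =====

-- B replaces A's per-match window slicing + Counter with a prefix-sum table of the match indicator
-- and a single ascending pass that accumulates each position's O(1) window match count into an
-- insertion-ordered dict (objective: alternative algorithm of similar cost).

-- ===== PORT A =====
def find_related_keywords (target_keyword : String) (text : String) (window_size : Int) : List String :=
  let words := PySem.Str.split₀ text
  let related := (PySem.List.enumerate words).foldl (fun related iw =>
    if PySem.Str.isIn (PySem.Str.lower target_keyword) (PySem.Str.lower iw.2) then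
      let start := max 0 (iw.1 - window_size)
      let stop := min (PySem.List.len words) (iw.1 + window_size + 1)
      let context := PySem.List.slice words (some start) (some stop)
      related ++ context.filter (fun x => !(PySem.Str.lower x == PySem.Str.lower target_keyword))
    else related) []
  let counts := PySem.Dict.counter related
  ((PySem.List.sorted counts.items (fun p => p.2) true).take 10).map (fun p => p.1)

def find_related_keywords_alt (target_keyword : String) (text : String) (window_size : Int) : List String :=
  let words := PySem.Str.split₀ text
  let t := PySem.Str.lower target_keyword
  let n := PySem.List.len words
  let lows := words.map (fun w => PySem.Str.lower w)
  let P := (lows.foldl (fun (st : Int × List Int) lw =>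
      let acc := if PySem.Str.isIn t lw then st.1 + 1 else st.1
      (acc, st.2 ++ [acc])) ((0 : Int), [(0 : Int)])).2
  let counts := (PySem.List.pyRange 0 n 1).foldl (fun (counts : PySem.Dict String Int) j =>
      if PySem.List.pyGetD lows j "" == t then counts
      else
        let lo := max 0 (j - window_size)
        let hi := min n (j + window_size + 1)
        let cnt := if lo < hi then PySem.List.pyGetD P hi 0 - PySem.List.pyGetD P lo 0 else 0
        if cnt ≠ 0 then
          counts.insert (PySem.List.pyGetD words j "") (counts.getD (PySem.List.pyGetD words j "") 0 + cnt)
        else counts) PySem.Dict.empty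
  ((PySem.List.sorted counts.items (fun p => p.2) true).take 10).map (fun p => p.1)

-- ===== PRECONDITION & SPEC =====
-- Pre_ restricts to the natural domain of nonnegative window sizes: for negative window_size the
-- end index i+window_size+1 of A's context slice can become negative and then wraps around to the
-- end of the word list (Python slice semantics), e.g. A returns ['y','z'] on ('a','ab x y z w',-2)
-- while B naturally returns [] there.
def Pre_find_related_keywords (target_keyword : String) (text : String) (window_size : Int) : Prop :=
  0 ≤ window_size
instance (target_keyword : String) (text : String) (window_size : Int) : Decidable (Pre_find_related_keywords target_keyword text window_size) := by
  unfold Pre_find_related_keywords; infer_instance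
def pvWitness_find_related_keywords : String × String × Int := ("cat", "the cat sat on a mat", 2)
def Spec_find_related_keywords (target_keyword : String) (text : String) (window_size : Int) (out : List String) : Prop := out = find_related_keywords_alt target_keyword text window_size
instance (target_keyword : String) (text : String) (window_size : Int) (out : List String) : Decidable (Spec_find_related_keywords target_keyword text window_size out) := by unfold Spec_find_related_keywords; infer_instance

-- ===== CLAIM (what is proved, stated in full; the proofs are below) =====
def Claim_equal_find_related_keywords : Prop := ∀ (target_keyword : String) (text : String) (window_size : Int), Dom_find_related_keywords target_keyword text window_size → Pre_find_related_keywords target_keyword text window_size → Spec_find_related_keywords target_keyword text window_size (find_related_keywords target_keyword text window_size)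

-- ===== LEMMAS AND PROOFS =====
def pvG (ws : List String) (j : Nat) : String := ws.getD j ""
def pvE (tl : String) (ws : List String) (j : Nat) : Bool := PySem.Str.lower (pvG ws j) == tl
def pvM (tl : String) (ws : List String) (j : Nat) : Bool := PySem.Str.isIn tl (PySem.Str.lower (pvG ws j))
def pvNear (W : Nat) (i j : Nat) : Bool := decide (i - W ≤ j) && decide (j ≤ i + W)
def pvBlock (tl : String) (ws : List String) (W : Nat) (i : Nat) : List String :=
  ((List.range ws.length).filter (fun j => pvNear W i j && !pvE tl ws j)).map (pvG ws)
def pvRel (tl : String) (ws : List String) (W : Nat) : List String :=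
  ((List.range ws.length).filter (pvM tl ws)).flatMap (pvBlock tl ws W)
def pvCnt (tl : String) (ws : List String) (W : Nat) (j : Nat) : Nat :=
  (List.range ws.length).countP (fun i => pvNear W j i && pvM tl ws i)
def pvQ (tl : String) (ws : List String) (W : Nat) : List Nat :=
  (List.range ws.length).filter (fun j => !pvE tl ws j && decide (pvCnt tl ws W j ≠ 0))
def pvDictB (tl : String) (ws : List String) (W : Nat) : PySem.Dict String Int :=
  (pvQ tl ws W).foldl (fun d j => d.insert (pvG ws j) (d.getD (pvG ws j) 0 + (pvCnt tl ws W j : Int))) PySem.Dict.empty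
def pvCov (tl : String) (ws : List String) (W : Nat) (M : List Nat) : List Nat :=
  (List.range ws.length).filter (fun j => !pvE tl ws j && M.any (fun i => pvNear W i j))
def pvOut (d : PySem.Dict String Int) : List String :=
  ((PySem.List.sorted d.items (fun p => p.2) true).take 10).map (fun p => p.1)

theorem pvFlatMap_if {α β : Type} (l : List α) (c : α → Bool) (f : α → List β) :
    l.flatMap (fun x => if c x then f x else []) = (l.filter c).flatMap f := by
  induction l with
  | nil => rfl
  | cons x t ih =>
    by_cases h : c x = true <;> simp [List.filter_cons, h, ih]

theorem pvFilter_split (l : List Nat) (hl : l.Pairwise (· ≤ ·)) (p q : Nat → Bool) (b : Nat)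
    (hp : ∀ j ∈ l, p j = true → j ≤ b) (hq : ∀ j ∈ l, q j = true → b < j) :
    l.filter (fun j => p j || q j) = l.filter p ++ l.filter q := by
  induction l with
  | nil => rfl
  | cons x t ih =>
    have ht := (List.pairwise_cons.mp hl).2
    have hx := (List.pairwise_cons.mp hl).1
    by_cases hq' : q x = true
    · have hbx : b < x := hq x (by simp) hq'
      have hpt : t.filter p = [] := by
        apply List.filter_eq_nil_iff.mpr
        intro a ha
        by_contra hpa
        have : a ≤ b := hp a (by simp [ha]) (by simpa using hpa)
        have := hx a ha
        omega
      have hpx : p x = false := by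
        by_contra h
        have : p x = true := by simpa using h
        have := hp x (by simp) this
        omega
      simp only [List.filter_cons, hq', hpx, Bool.or_true, if_true]
      simp only [Bool.false_eq_true, if_false]
      rw [ih ht (fun j hj => hp j (by simp [hj])) (fun j hj => hq j (by simp [hj])), hpt]
      simp [List.filter_cons, hq']
    · have hqx : q x = false := by simpa using hq'
      by_cases hp' : p x = true
      · simp only [List.filter_cons, hp', hqx, Bool.true_or, if_true]
        rw [ih ht (fun j hj => hp j (by simp [hj])) (fun j hj => hq j (by simp [hj]))]
        simp
      · have hpx : p x = false := by simpa using hp'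
        simp only [List.filter_cons, hpx, hqx, Bool.or_self, if_false]
        exact ih ht (fun j hj => hp j (by simp [hj])) (fun j hj => hq j (by simp [hj]))

theorem pvOfList_append {α : Type} [BEq α] (X Y : List α) :
    PySem.Set.ofList (X ++ Y) = PySem.Set.update (PySem.Set.ofList X) Y := by
  rw [PySem.Set.ofList_eq_foldl, PySem.Set.ofList_eq_foldl, List.foldl_append]
  rfl

theorem pvUpdate_of_subset {α : Type} [BEq α] [LawfulBEq α] (S : PySem.Set α) (O : List α)
    (h : ∀ x ∈ O, x ∈ S) : PySem.Set.update S O = S := by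
  induction O generalizing S with
  | nil => rfl
  | cons o t ih =>
    have : PySem.Set.add S o = S := PySem.Set.add_of_mem (h o (by simp))
    show List.foldl PySem.Set.add S (o :: t) = S
    rw [List.foldl_cons, this]
    exact ih S (fun x hx => h x (by simp [hx]))

theorem pvOfList_mid {α : Type} [BEq α] [LawfulBEq α] (A O N : List α) (h : ∀ x ∈ O, x ∈ A) :
    PySem.Set.ofList (A ++ (O ++ N)) = PySem.Set.ofList (A ++ N) := by
  rw [show A ++ (O ++ N) = (A ++ O) ++ N by simp, pvOfList_append, pvOfList_append,
      pvOfList_append, pvUpdate_of_subset (PySem.Set.ofList A) O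
        (fun x hx => (PySem.Set.mem_ofList A x).mpr (h x hx))]

theorem pvMap_range' {α : Type} (l : List α) (d : α) (k lo : Nat) (h : lo + k ≤ l.length) :
    (List.range' lo k).map (fun j => l.getD j d) = (l.drop lo).take k := by
  induction k generalizing lo with
  | zero => simp
  | succ k ih =>
    have hlo : lo < l.length := by omega
    rw [List.range'_succ, List.map_cons, ih (lo + 1) (by omega)]
    rw [List.getD_eq_getElem l d hlo, List.drop_eq_getElem_cons hlo, List.take_succ_cons]

theorem pvRangeFilter_eq (n lo hi : Nat) (h1 : lo ≤ hi) (h2 : hi ≤ n) :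
    (List.range n).filter (fun j => decide (lo ≤ j) && decide (j < hi)) = List.range' lo (hi - lo) := by
  have hsplit : List.range n = (List.range' 0 lo ++ List.range' lo (hi - lo)) ++ List.range' hi (n - hi) := by
    have e1 : List.range' 0 lo ++ List.range' lo (hi - lo) = List.range' 0 hi := by
      have := @List.range'_append 0 lo (hi - lo) 1
      simp only [Nat.one_mul, Nat.zero_add] at this
      rw [this, show lo + (hi - lo) = hi by omega]
    have e2 : List.range' 0 hi ++ List.range' hi (n - hi) = List.range' 0 n := by
      have := @List.range'_append 0 hi (n - hi) 1
      simp only [Nat.one_mul, Nat.zero_add] at this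
      rw [this, show hi + (n - hi) = n by omega]
    rw [e1, e2, List.range_eq_range']
  rw [hsplit, List.filter_append, List.filter_append]
  rw [List.filter_eq_nil_iff.mpr (by intro a ha; simp at ha ⊢; omega)]
  rw [List.filter_eq_self.mpr (by intro a ha; simp at ha ⊢; omega)]
  rw [List.filter_eq_nil_iff.mpr (by intro a ha; simp at ha ⊢; omega)]
  simp

theorem pvSegment_eq {α : Type} (l : List α) (d : α) (lo hi : Nat) (h1 : lo ≤ hi) (h2 : hi ≤ l.length) :
    (l.drop lo).take (hi - lo) = ((List.range l.length).filter (fun j => decide (lo ≤ j) && decide (j < hi))).map (fun j => l.getD j d) := by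
  rw [pvRangeFilter_eq l.length lo hi h1 h2, pvMap_range' l d (hi - lo) lo (by omega)]

theorem pvItems_eq_keys_map (d : PySem.Dict String Int) (h : d.keys.Nodup) :
    d.items = d.keys.map (fun k => (k, d.getD k 0)) := by
  have hk : d.keys = d.items.map (fun p => p.1) := rfl
  rw [hk, List.map_map]
  have hpt : ∀ p ∈ d.items, ((fun k => (k, d.getD k 0)) ∘ fun p => p.1) p = id p := by
    intro p hp
    have hg : d.get? p.1 = some p.2 := PySem.Dict.get?_of_mem_items d (by simpa using hp) h
    simp only [Function.comp, id]
    rw [PySem.Dict.getD_of_get?_eq_some _ 0 hg]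
  rw [List.map_congr_left hpt, List.map_id]

theorem pvDict_group (L : List Nat) (key : Nat → String) (v : Nat → Int) (d : PySem.Dict String Int)
    (h : d.keys.Nodup) :
    (L.foldl (fun d j => d.insert (key j) (d.getD (key j) 0 + v j)) d).items
      = (PySem.Set.update d.keys (L.map key)).map
          (fun k => (k, d.getD k 0 + ((L.filter (fun x => key x == k)).map v).sum)) := by
  induction L generalizing d with
  | nil =>
    simp only [List.foldl_nil, List.map_nil, List.filter_nil, List.sum_nil, List.map_nil]
    show d.items = d.keys.map _
    rw [pvItems_eq_keys_map d h]
    simp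
  | cons x t ih =>
    rw [List.foldl_cons]
    set d' := d.insert (key x) (d.getD (key x) 0 + v x) with hd'
    have hk' : d'.keys.Nodup := PySem.Dict.nodup_keys_insert d _ _ h
    rw [ih d' hk']
    have hkeys : d'.keys = PySem.Set.add d.keys (key x) := by
      by_cases hc : d.contains (key x) = true
      · rw [hd', PySem.Dict.keys_insert_of_contains d _ hc, PySem.Set.add,
            PySem.Set.contains_eq_listContains]
        have : key x ∈ d.keys := (PySem.Dict.contains_iff_mem_keys d (key x)).mp hc
        simp [this]
      · have hc' : d.contains (key x) = false := by simpa using hc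
        rw [hd', PySem.Dict.keys_insert_of_not_contains d _ hc', PySem.Set.add,
            PySem.Set.contains_eq_listContains]
        have : ¬ key x ∈ d.keys := fun hm => by
          simp [(PySem.Dict.contains_iff_mem_keys d (key x)).mpr hm] at hc
        simp [this]
    have hupd : PySem.Set.update d.keys ((x :: t).map key) = PySem.Set.update d'.keys (t.map key) := by
      rw [hkeys]; rfl
    rw [← hupd]
    apply List.map_congr_left
    intro k hk
    by_cases he : key x = k
    · subst he
      have : d'.getD (key x) 0 = d.getD (key x) 0 + v x := by
        rw [hd', PySem.Dict.getD_insert_self]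
      rw [this]
      simp only [List.filter_cons, BEq.rfl, if_true, List.map_cons, List.sum_cons]
      ring_nf
    · have hne : (key x == k) = false := by simp [he]
      have : d'.getD k 0 = d.getD k 0 := by
        rw [hd', PySem.Dict.getD_insert_of_ne]
        exact fun hh => he hh.symm
      rw [this]
      simp only [List.filter_cons, hne, Bool.false_eq_true, if_false]

theorem pvC1 (tl : String) (ws : List String) (W : Nat) (M : List Nat) (hM : M.Pairwise (· < ·)) :
    PySem.Set.ofList (M.flatMap (pvBlock tl ws W)) = PySem.Set.ofList ((pvCov tl ws W M).map (pvG ws)) := by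
  induction M using List.reverseRecOn with
  | nil =>
    simp only [List.flatMap_nil]
    have : pvCov tl ws W [] = [] := by
      simp [pvCov]
    rw [this]; rfl
  | append_singleton M i0 ih =>
    have hM' : M.Pairwise (· < ·) := (List.pairwise_append.mp hM).1
    have hlt : ∀ i ∈ M, i < i0 := by
      intro i hi
      exact (List.pairwise_append.mp hM).2.2 i hi i0 (by simp)
    rw [List.flatMap_append, List.flatMap_singleton]
    cases M with
    | nil =>
      simp only [List.flatMap_nil, List.nil_append]
      have : pvCov tl ws W [i0] = (List.range ws.length).filter (fun j => pvNear W i0 j && !pvE tl ws j) := by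
        apply List.filter_congr
        intro j _
        simp [pvCov, Bool.and_comm]
      rw [this, pvBlock]
    | cons a M' =>
      set M := a :: M' with hMdef
      have hne : M ≠ [] := by simp [hMdef]
      set im := M.getLast hne with him
      have himM : im ∈ M := List.getLast_mem hne
      have hmax : ∀ i ∈ M, i ≤ im := by
        intro i hi
        rcases List.mem_iff_getElem.mp hi with ⟨idx, hidx, rfl⟩
        have hlen : 0 < M.length := List.length_pos_of_ne_nil hne
        rw [him, List.getLast_eq_getElem]
        rcases Nat.lt_or_ge idx (M.length - 1) with h | h
        · have := List.pairwise_iff_getElem.mp hM' idx (M.length - 1) (by omega) (by omega) (by omega)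
          omega
        · have : idx = M.length - 1 := by omega
          subst this
          exact le_refl _
      -- cov splits
      have himlt : im < i0 := hlt im himM
      have hcov : pvCov tl ws W (M ++ [i0])
          = pvCov tl ws W M ++ (List.range ws.length).filter
              (fun j => (!pvE tl ws j && pvNear W i0 j) && decide (im + W < j)) := by
        rw [pvCov]
        have hpoint : ∀ j ∈ List.range ws.length,
            (!pvE tl ws j && (M ++ [i0]).any (fun i => pvNear W i j))
              = ((!pvE tl ws j && M.any (fun i => pvNear W i j))
                 || ((!pvE tl ws j && pvNear W i0 j) && decide (im + W < j))) := by
          intro j _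
          by_cases hbj : im + W < j
          · have hanyM : M.any (fun i => pvNear W i j) = false := by
              rw [List.any_eq_false]
              intro i hi
              simp only [pvNear, Bool.and_eq_true, decide_eq_true_eq, not_and]
              have := hmax i hi
              omega
            simp [List.any_append, hanyM, hbj]
          · by_cases hn : pvNear W i0 j = true
            · have hany : M.any (fun i => pvNear W i j) = true := by
                refine List.any_eq_true.mpr ⟨im, himM, ?_⟩
                simp only [pvNear, Bool.and_eq_true, decide_eq_true_eq] at hn ⊢
                omega
              simp [List.any_append, hany, hbj, hn]
            · have hn' : pvNear W i0 j = false := by simpa using hn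
              simp [List.any_append, hn', hbj]
        rw [List.filter_congr hpoint]
        apply pvFilter_split (b := im + W) _ (List.pairwise_lt_range.imp (fun h => Nat.le_of_lt h))
        · intro j _ hj
          rcases Bool.and_eq_true .. |>.mp hj with ⟨-, hany⟩
          rcases List.any_eq_true.mp hany with ⟨i, hi, hni⟩
          simp only [pvNear, Bool.and_eq_true, decide_eq_true_eq] at hni
          have := hmax i hi
          omega
        · intro j _ hj
          rcases Bool.and_eq_true .. |>.mp hj with ⟨-, hd⟩
          simpa using hd
      -- block splits
      have hblock : (List.range ws.length).filter (fun j => pvNear W i0 j && !pvE tl ws j)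
          = (List.range ws.length).filter (fun j => (pvNear W i0 j && !pvE tl ws j) && decide (j ≤ im + W))
            ++ (List.range ws.length).filter (fun j => (!pvE tl ws j && pvNear W i0 j) && decide (im + W < j)) := by
        have hpoint : ∀ j ∈ List.range ws.length,
            (pvNear W i0 j && !pvE tl ws j)
              = (((pvNear W i0 j && !pvE tl ws j) && decide (j ≤ im + W))
                 || ((!pvE tl ws j && pvNear W i0 j) && decide (im + W < j))) := by
          intro j _
          by_cases hbj : im + W < j
          · have h1 : decide (j ≤ im + W) = false := by simp; omega
            have h2 : decide (im + W < j) = true := by simpa using hbj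
            cases hn : pvNear W i0 j <;> cases he : pvE tl ws j <;> simp [h1, h2]
          · have h1 : decide (j ≤ im + W) = true := by simp; omega
            have h2 : decide (im + W < j) = false := by simp; omega
            cases hn : pvNear W i0 j <;> cases he : pvE tl ws j <;> simp [h1, h2]
        rw [List.filter_congr hpoint]
        apply pvFilter_split (b := im + W) _ (List.pairwise_lt_range.imp (fun h => Nat.le_of_lt h))
        · intro j _ hj
          rcases Bool.and_eq_true .. |>.mp hj with ⟨-, hd⟩
          simpa using hd
        · intro j _ hj
          rcases Bool.and_eq_true .. |>.mp hj with ⟨-, hd⟩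
          simpa using hd
      have hO : ∀ x ∈ ((List.range ws.length).filter
            (fun j => (pvNear W i0 j && !pvE tl ws j) && decide (j ≤ im + W))).map (pvG ws),
          x ∈ (pvCov tl ws W M).map (pvG ws) := by
        intro x hx
        rcases List.mem_map.mp hx with ⟨j, hj, rfl⟩
        rcases List.mem_filter.mp hj with ⟨hjr, hcond⟩
        rcases Bool.and_eq_true .. |>.mp hcond with ⟨hc1, hjb⟩
        rcases Bool.and_eq_true .. |>.mp hc1 with ⟨hnear, hqe⟩
        refine List.mem_map.mpr ⟨j, List.mem_filter.mpr ⟨hjr, ?_⟩, rfl⟩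
        refine Bool.and_eq_true .. |>.mpr ⟨hqe, List.any_eq_true.mpr ⟨im, himM, ?_⟩⟩
        simp only [pvNear, Bool.and_eq_true, decide_eq_true_eq] at hnear ⊢
        simp only [decide_eq_true_eq] at hjb
        omega
      rw [pvOfList_append, ih hM', ← pvOfList_append, pvBlock, hblock, List.map_append,
          pvOfList_mid _ _ _ hO, hcov, List.map_append]

theorem pvSumRange (n : Nat) (f : Nat → Nat) : ((List.range n).map f).sum = ∑ i ∈ Finset.range n, f i := by
  induction n with
  | zero => simp
  | succ n ih => rw [List.range_succ, List.map_append, List.sum_append, Finset.sum_range_succ, ih]; simp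

theorem pvCountP_sum {α : Type} (l : List α) (p : α → Bool) :
    l.countP p = (l.map (fun x => if p x then 1 else 0)).sum := by
  induction l with
  | nil => rfl
  | cons x t ih => rw [List.countP_cons, List.map_cons, List.sum_cons, ih]; split <;> omega

theorem pvCountP_flatMap {α β : Type} (l : List α) (f : α → List β) (p : β → Bool) :
    (l.flatMap f).countP p = (l.map (fun x => (f x).countP p)).sum := by
  induction l with
  | nil => rfl
  | cons x t ih => rw [List.flatMap_cons, List.countP_append, List.map_cons, List.sum_cons, ih]

theorem pvSum_filter {α : Type} (l : List α) (q : α → Bool) (f : α → Nat) :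
    ((l.filter q).map f).sum = (l.map (fun x => if q x then f x else 0)).sum := by
  induction l with
  | nil => rfl
  | cons x t ih =>
    rw [List.filter_cons]
    split <;> simp_all

theorem pvCountP_range_sum (n : Nat) (p : Nat → Bool) :
    (List.range n).countP p = ∑ j ∈ Finset.range n, if p j then 1 else 0 := by
  rw [pvCountP_sum, pvSumRange]

theorem pvNear_comm (W i j : Nat) : pvNear W i j = pvNear W j i := by
  simp only [pvNear, ← Bool.decide_and]
  exact decide_eq_decide.mpr (by omega)

theorem pvCovQ (tl : String) (ws : List String) (W : Nat) :
    pvCov tl ws W ((List.range ws.length).filter (pvM tl ws)) = pvQ tl ws W := by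
  rw [pvCov, pvQ]
  apply List.filter_congr
  intro j hj
  congr 1
  rw [Bool.eq_iff_iff, List.any_eq_true, decide_eq_true_eq]
  constructor
  · rintro ⟨i, hi, hni⟩
    rcases List.mem_filter.mp hi with ⟨hir, him⟩
    intro h0
    have := List.countP_eq_zero.mp h0 i hir
    rw [pvNear_comm] at hni
    simp [hni, him] at this
  · intro h0
    by_contra hc
    apply h0
    apply List.countP_eq_zero.mpr
    intro i hir hh
    rcases Bool.and_eq_true .. |>.mp hh with ⟨hn, hm⟩
    exact hc ⟨i, List.mem_filter.mpr ⟨hir, hm⟩, by rw [pvNear_comm]; exact hn⟩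

theorem pvSwapNat (tl : String) (ws : List String) (W : Nat) (k : String) :
    (pvRel tl ws W).count k
      = (((pvQ tl ws W).filter (fun x => pvG ws x == k)).map (pvCnt tl ws W)).sum := by
  rw [pvRel, List.count_eq_countP, pvCountP_flatMap, pvSum_filter, pvSumRange]
  rw [pvQ, pvSum_filter, pvSum_filter, pvSumRange]
  have hblock : ∀ i, (pvBlock tl ws W i).countP (· == k)
      = ∑ j ∈ Finset.range ws.length, if (pvNear W i j && !pvE tl ws j) && (pvG ws j == k) then 1 else 0 := by
    intro i
    rw [pvBlock, List.countP_map, List.countP_filter, pvCountP_range_sum]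
    apply Finset.sum_congr rfl
    intro j _
    congr 1
    simp [Function.comp, Bool.and_comm]
  have lhs_eq : ∑ i ∈ Finset.range ws.length,
        (if pvM tl ws i then (pvBlock tl ws W i).countP (· == k) else 0)
      = ∑ j ∈ Finset.range ws.length, ∑ i ∈ Finset.range ws.length,
          if pvM tl ws i && ((pvNear W i j && !pvE tl ws j) && (pvG ws j == k)) then 1 else 0 := by
    rw [Finset.sum_comm]
    apply Finset.sum_congr rfl
    intro i _
    by_cases hm : pvM tl ws i = true
    · rw [if_pos hm, hblock i]
      apply Finset.sum_congr rfl
      intro j _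
      simp [hm]
    · have hm' : pvM tl ws i = false := by simpa using hm
      rw [if_neg (by simp [hm'])]
      symm
      apply Finset.sum_eq_zero
      intro j _
      simp [hm']
  rw [lhs_eq]
  apply Finset.sum_congr rfl
  intro j _
  have hsum : pvE tl ws j = false → (pvG ws j == k) = true →
      ∑ i ∈ Finset.range ws.length,
        (if pvM tl ws i && ((pvNear W i j && !pvE tl ws j) && (pvG ws j == k)) then 1 else 0)
        = pvCnt tl ws W j := by
    intro he hk
    rw [pvCnt, pvCountP_range_sum]
    apply Finset.sum_congr rfl
    intro i _
    congr 1
    have hnear : pvNear W i j = pvNear W j i := pvNear_comm W i j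
    rw [hnear, he, hk]
    cases pvM tl ws i <;> cases pvNear W j i <;> simp
  have hzero : pvE tl ws j = true ∨ (pvG ws j == k) = false →
      ∑ i ∈ Finset.range ws.length,
        (if pvM tl ws i && ((pvNear W i j && !pvE tl ws j) && (pvG ws j == k)) then 1 else 0) = 0 := by
    intro h
    apply Finset.sum_eq_zero
    intro i _
    rcases h with h | h <;> simp [h]
  by_cases he : pvE tl ws j = true
  · rw [hzero (Or.inl he)]
    simp [he]
  · have he' : pvE tl ws j = false := by simpa using he
    by_cases hk : (pvG ws j == k) = true
    · rw [hsum he' hk]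
      by_cases hz : pvCnt tl ws W j = 0
      · rw [hz]
        split <;> simp [hk]
      · rw [if_pos (by simp [he', hz]), if_pos hk]
    · have hk' : (pvG ws j == k) = false := by simpa using hk
      rw [hzero (Or.inr hk')]
      split <;> simp [hk']

theorem pvSwap (tl : String) (ws : List String) (W : Nat) (k : String) :
    ((pvRel tl ws W).count k : Int)
      = (((pvQ tl ws W).filter (fun x => pvG ws x == k)).map (fun j => (pvCnt tl ws W j : Int))).sum := by
  rw [pvSwapNat, Nat.cast_list_sum, List.map_map]
  rfl

theorem pvPfold (l : List String) (p : String → Bool) (a : Int) (L : List Int) :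
    l.foldl (fun (st : Int × List Int) x =>
        ((if p x then st.1 + 1 else st.1), st.2 ++ [if p x then st.1 + 1 else st.1])) (a, L)
      = (a + (l.countP p : Int),
         L ++ (List.range l.length).map (fun k => a + ((l.take (k+1)).countP p : Int))) := by
  induction l generalizing a L with
  | nil => simp
  | cons x t ih =>
    rw [List.foldl_cons, ih]
    rw [Prod.mk.injEq]
    refine ⟨?_, ?_⟩
    · rw [List.countP_cons]
      split <;> push_cast <;> omega
    · rw [List.length_cons, List.range_succ_eq_map, List.map_cons, List.map_map]
      have h0 : a + (((x :: t).take (0 + 1)).countP p : Int) = (if p x then a + 1 else a) := by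
        simp only [List.take_succ_cons, List.take_zero, List.countP_cons, List.countP_nil]
        split <;> simp
      have hmap : ∀ k ∈ List.range t.length,
          ((fun k => a + (((x :: t).take (k + 1)).countP p : Int)) ∘ Nat.succ) k
            = (fun k => (if p x then a + 1 else a) + ((t.take (k + 1)).countP p : Int)) k := by
        intro k _
        simp only [Function.comp, Nat.succ_eq_add_one, List.take_succ_cons, List.countP_cons]
        split <;> push_cast <;> omega
      rw [List.map_congr_left hmap, h0]
      simp

theorem pvLows_getD (ws : List String) (j : Nat) (hj : j < ws.length) :
    (ws.map PySem.Str.lower).getD j "" = PySem.Str.lower (ws.getD j "") := by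
  rw [List.getD_eq_getElem _ _ (by simpa using hj), List.getD_eq_getElem _ _ hj, List.getElem_map]

theorem pvCntDiff (tl : String) (ws : List String) (W : Nat) (j : Nat) (hj : j < ws.length) :
    ((((ws.map PySem.Str.lower).take (min ws.length (j + W + 1))).countP (fun x => PySem.Str.isIn tl x) : Int)
      - (((ws.map PySem.Str.lower).take (j - W)).countP (fun x => PySem.Str.isIn tl x) : Int))
      = (pvCnt tl ws W j : Int) := by
  set lws := ws.map PySem.Str.lower with hlws
  have hlen : lws.length = ws.length := by simp [hlws]
  set lo := j - W with hlo
  set hi := min ws.length (j + W + 1) with hhi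
  have h1 : lo ≤ hi := by omega
  have h2 : hi ≤ lws.length := by omega
  have hsplit : lws.take hi = lws.take lo ++ (lws.drop lo).take (hi - lo) := by
    rw [← List.take_add, show lo + (hi - lo) = hi by omega]
  rw [hsplit, List.countP_append]
  have hseg := pvSegment_eq lws "" lo hi h1 h2
  rw [hseg, List.countP_map, pvCnt]
  have : List.countP ((fun x => PySem.Str.isIn tl x) ∘ fun j => lws.getD j "") 
           ((List.range lws.length).filter (fun x => decide (lo ≤ x) && decide (x < hi)))
         = List.countP (fun i => pvNear W j i && pvM tl ws i) (List.range ws.length) := by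
    rw [List.countP_filter, hlen]
    apply List.countP_congr
    intro i hi'
    have hin : i < ws.length := List.mem_range.mp hi'
    have hm : ((fun x => PySem.Str.isIn tl x) ∘ fun j => lws.getD j "") i = pvM tl ws i := by
      simp only [Function.comp]
      rw [hlws, pvLows_getD ws i hin]
      rfl
    have hb : (decide (lo ≤ i) && decide (i < hi)) = pvNear W j i := by
      simp only [pvNear, ← Bool.decide_and]
      exact decide_eq_decide.mpr (by omega)
    rw [hm, hb, Bool.and_comm]
  rw [this]
  omega

set_option maxHeartbeats 1000000 in
theorem pvLA_core (tl : String) (ws : List String) (w : Int) (hw : 0 ≤ w) :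
    (PySem.List.enumerate ws).foldl (fun related iw =>
      if PySem.Str.isIn tl (PySem.Str.lower iw.2) then
        related ++ (PySem.List.slice ws (some (max 0 (iw.1 - w))) (some (min (PySem.List.len ws) (iw.1 + w + 1)))).filter
          (fun x => !(PySem.Str.lower x == tl))
      else related) []
      = pvRel tl ws w.toNat := by
  set W := w.toNat with hW
  rw [PySem.List.enumerate_eq_map_pyRange ws "", List.foldl_map, PySem.List.len_eq,
      PySem.List.pyRange_zero_nat, List.foldl_map]
  rw [PySem.List.foldl_congr_mem _ _ (fun rel (j : Nat) =>
      rel ++ (if pvM tl ws j then pvBlock tl ws W j else [])) _ ?_]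
  · rw [PySem.List.foldl_append_eq_flatMap, pvFlatMap_if, List.nil_append, pvRel]
  · intro rel j hj
    have hjn : j < ws.length := List.mem_range.mp hj
    simp only [PySem.List.pyGetD_natCast]
    have hg : ws.getD j "" = pvG ws j := rfl
    rw [hg]
    by_cases hm : pvM tl ws j = true
    · rw [if_pos ?_, if_pos hm]
      swap
      · simpa [pvM, pvG] using hm
      congr 1
      have ha : max 0 ((j : Int) - w) = (((j - W : Nat) : Int)) := by omega
      have hb : min ((ws.length : Int)) ((j : Int) + w + 1) = ((min ws.length (j + W + 1) : Nat) : Int) := by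
        omega
      rw [ha, hb, PySem.List.slice_natCast]
      have h1 : j - W ≤ min ws.length (j + W + 1) := by omega
      have h2 : min ws.length (j + W + 1) ≤ ws.length := by omega
      rw [pvSegment_eq ws "" (j - W) (min ws.length (j + W + 1)) h1 h2]
      rw [List.filter_map, pvBlock]
      congr 1
      rw [List.filter_filter]
      apply List.filter_congr
      intro x hx
      have hxn : x < ws.length := List.mem_range.mp hx
      have hdec : (decide (j - W ≤ x) && decide (x < min ws.length (j + W + 1))) = pvNear W j x := by
        simp only [pvNear, ← Bool.decide_and]
        exact decide_eq_decide.mpr (by omega)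
      rw [← hdec]
      have hcomp : ((fun x => !(PySem.Str.lower x == tl)) ∘ fun j => ws.getD j "") x = !pvE tl ws x := rfl
      rw [hcomp]
      cases h1 : decide (j - W ≤ x) <;> cases h2 : decide (x < min ws.length (j + W + 1)) <;>
        cases h3 : pvE tl ws x <;> simp
    · have hm' : pvM tl ws j = false := by simpa using hm
      rw [if_neg ?_, if_neg (by simp [hm'])]
      · simp
      · simpa [pvM, pvG] using hm

theorem pvLA (target_keyword text : String) (w : Int) (hw : 0 ≤ w) :
    find_related_keywords target_keyword text w
      = pvOut (PySem.Dict.counter (pvRel (PySem.Str.lower target_keyword) (PySem.Str.split₀ text) w.toNat)) := by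
  simp only [find_related_keywords]
  rw [pvLA_core (PySem.Str.lower target_keyword) (PySem.Str.split₀ text) w hw]
  rfl

set_option maxHeartbeats 1000000 in
theorem pvLB_core (tl : String) (ws : List String) (w : Int) (hw : 0 ≤ w) :
    (PySem.List.pyRange 0 (PySem.List.len ws) 1).foldl (fun (counts : PySem.Dict String Int) j =>
      if PySem.List.pyGetD (ws.map (fun x => PySem.Str.lower x)) j "" == tl then counts
      else
        let lo := max 0 (j - w)
        let hi := min (PySem.List.len ws) (j + w + 1)
        let cnt := if lo < hi then
            PySem.List.pyGetD ((ws.map (fun x => PySem.Str.lower x)).foldl (fun (st : Int × List Int) lw =>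
              ((if PySem.Str.isIn tl lw then st.1 + 1 else st.1),
               st.2 ++ [if PySem.Str.isIn tl lw then st.1 + 1 else st.1])) ((0 : Int), [(0 : Int)])).2 hi 0
            - PySem.List.pyGetD ((ws.map (fun x => PySem.Str.lower x)).foldl (fun (st : Int × List Int) lw =>
              ((if PySem.Str.isIn tl lw then st.1 + 1 else st.1),
               st.2 ++ [if PySem.Str.isIn tl lw then st.1 + 1 else st.1])) ((0 : Int), [(0 : Int)])).2 lo 0
          else 0
        if cnt ≠ 0 then
          counts.insert (PySem.List.pyGetD ws j "") (counts.getD (PySem.List.pyGetD ws j "") 0 + cnt)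
        else counts) PySem.Dict.empty
      = pvDictB tl ws w.toNat := by
  set W := w.toNat with hW
  set lws := ws.map (fun x => PySem.Str.lower x) with hlws
  have hlen : lws.length = ws.length := by simp [hlws]
  rw [pvPfold lws (fun x => PySem.Str.isIn tl x) 0 [(0:Int)]]
  have hPPeq : ([(0:Int)] ++ (List.range lws.length).map (fun k => 0 + ((lws.take (k+1)).countP (fun x => PySem.Str.isIn tl x) : Int)))
      = (List.range (ws.length + 1)).map (fun k => ((lws.take k).countP (fun x => PySem.Str.isIn tl x) : Int)) := by
    rw [List.range_succ_eq_map, List.map_cons, List.map_map, hlen]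
    simp
  have hPP : ∀ k : Nat, k ≤ ws.length →
      PySem.List.pyGetD ((List.range (ws.length + 1)).map (fun k => ((lws.take k).countP (fun x => PySem.Str.isIn tl x) : Int))) (k : Int) 0
        = ((lws.take k).countP (fun x => PySem.Str.isIn tl x) : Int) := by
    intro k hk
    rw [PySem.List.pyGetD_natCast, List.getD_eq_getElem _ _ (by simpa using Nat.lt_succ_of_le hk),
        List.getElem_map, List.getElem_range]
  rw [PySem.List.len_eq, PySem.List.pyRange_zero_nat, List.foldl_map]
  rw [PySem.List.foldl_congr_mem _ _ (fun (d : PySem.Dict String Int) (j : Nat) =>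
      if (!pvE tl ws j && decide (pvCnt tl ws W j ≠ 0)) then
        d.insert (pvG ws j) (d.getD (pvG ws j) 0 + (pvCnt tl ws W j : Int))
      else d) _ ?_]
  · rw [PySem.List.foldl_if_eq_foldl_filter, pvDictB, pvQ]
  · intro d j hj
    have hjn : j < ws.length := List.mem_range.mp hj
    simp only [PySem.List.pyGetD_natCast]
    rw [show lws.getD j "" = PySem.Str.lower (ws.getD j "") from pvLows_getD ws j hjn]
    by_cases he : pvE tl ws j = true
    · rw [if_pos (by simpa [pvE, pvG] using he), if_neg (by simp [he])]
    · have he' : pvE tl ws j = false := by simpa using he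
      rw [if_neg (by simpa [pvE, pvG] using he)]
      have ha : max 0 ((j : Int) - w) = (((j - W : Nat) : Int)) := by omega
      have hb : min ((ws.length : Int)) ((j : Int) + w + 1) = ((min ws.length (j + W + 1) : Nat) : Int) := by
        omega
      rw [ha, hb, hPPeq]
      rw [if_pos (show (((j - W : Nat) : Int)) < ((min ws.length (j + W + 1) : Nat) : Int) by
        push_cast; omega)]
      rw [hPP _ (by omega), hPP _ (by omega)]
      rw [pvCntDiff tl ws W j hjn]
      by_cases hz : pvCnt tl ws W j = 0
      · rw [if_neg (by simp [hz]), if_neg (by simp [he', hz])]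
      · rw [if_pos (by simpa using hz), if_pos (by simp [he', hz])]
        rfl

theorem pvLB (target_keyword text : String) (w : Int) (hw : 0 ≤ w) :
    find_related_keywords_alt target_keyword text w
      = pvOut (pvDictB (PySem.Str.lower target_keyword) (PySem.Str.split₀ text) w.toNat) := by
  simp only [find_related_keywords_alt]
  rw [pvLB_core (PySem.Str.lower target_keyword) (PySem.Str.split₀ text) w hw]
  rfl

theorem pvDictEq (tl : String) (ws : List String) (W : Nat) :
    PySem.Dict.counter (pvRel tl ws W) = pvDictB tl ws W := by
  apply PySem.Dict.ext
  rw [PySem.Dict.items_counter, pvDictB,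
      pvDict_group (pvQ tl ws W) (pvG ws) (fun j => (pvCnt tl ws W j : Int)) PySem.Dict.empty
        (by rw [PySem.Dict.keys_empty]; exact List.nodup_nil)]
  have hupd : PySem.Set.update (PySem.Dict.empty : PySem.Dict String Int).keys ((pvQ tl ws W).map (pvG ws))
      = PySem.Set.ofList ((pvQ tl ws W).map (pvG ws)) := by
    rw [PySem.Dict.keys_empty, PySem.Set.ofList_eq_foldl]
    rfl
  have hsets : PySem.Set.ofList (pvRel tl ws W) = PySem.Set.ofList ((pvQ tl ws W).map (pvG ws)) := by
    rw [pvRel, pvC1 tl ws W ((List.range ws.length).filter (pvM tl ws))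
          (List.Pairwise.filter _ (List.pairwise_lt_range)), pvCovQ]
  rw [hupd, ← hsets]
  apply List.map_congr_left
  intro k _
  rw [PySem.Dict.getD_empty, pvSwap]
  ring_nf

theorem pvFinal (target_keyword text : String) (w : Int) (hw : 0 ≤ w) :
    find_related_keywords target_keyword text w = find_related_keywords_alt target_keyword text w := by
  rw [pvLA target_keyword text w hw, pvLB target_keyword text w hw, pvDictEq]

-- ===== VERDICT (by name: the statement is the Claim_ definition above) =====
theorem find_related_keywords_spec : Claim_equal_find_related_keywords := by
  intro target_keyword text window_size _ hpre
  show find_related_keywords target_keyword text window_size = find_related_keywords_alt target_keyword text window_size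
  exact pvFinal target_keyword text window_size hpre
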